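-- pv_equiv track=rewrite | github.com/peligwen/bark-buddy | host/monitor_pins.py | analyze_pin_pulses
-- ===== SOURCE A (Python) =====
-- def analyze_pin_pulses(capture_data, pin):
--     """Extract pulse timing for a specific GPIO pin from capture data."""
--     mask = 1 << pin
--     transitions = []
--     prev_state = None
--     for t_us, gpio_val in capture_data:
--         state = bool(gpio_val & mask)
--         if prev_state is not None and state != prev_state:
--             transitions.append((t_us, 'rise' if state else 'fall'))
--         prev_state = state
--     return transitions
-- ===== SOURCE B (Python) =====
-- def analyze_pin_pulses(capture_data, pin):
--     """Extract pulse timing by decomposing samples into maximal constant-state runs: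
--     the outer loop jumps run to run, the inner loop finds each run's end, and one
--     transition is emitted at every run boundary."""
--     mask = 1 << pin
--     pairs = [(t_us, bool(gpio_val & mask)) for t_us, gpio_val in capture_data]
--     transitions = []
--     i, n = 0, len(pairs)
--     while i < n:
--         s = pairs[i][1]
--         j = i + 1
--         while j < n and pairs[j][1] == s:
--             j += 1
--         if j < n:
--             transitions.append((pairs[j][0], 'rise' if pairs[j][1] else 'fall'))
--         i = j
--     return transitions
-- ===== Notes on version B (the rewrite author's own statement) =====
-- stated objective: alternative
-- what changed: Replaces A's per-sample scan carrying a prev_state/None sentinel by a run-length decomposition: an outer loop jumps from one maximal constant-state run to the next via an inner scan for the run's end, emitting one transition per run boundary.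
import Mathlib
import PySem

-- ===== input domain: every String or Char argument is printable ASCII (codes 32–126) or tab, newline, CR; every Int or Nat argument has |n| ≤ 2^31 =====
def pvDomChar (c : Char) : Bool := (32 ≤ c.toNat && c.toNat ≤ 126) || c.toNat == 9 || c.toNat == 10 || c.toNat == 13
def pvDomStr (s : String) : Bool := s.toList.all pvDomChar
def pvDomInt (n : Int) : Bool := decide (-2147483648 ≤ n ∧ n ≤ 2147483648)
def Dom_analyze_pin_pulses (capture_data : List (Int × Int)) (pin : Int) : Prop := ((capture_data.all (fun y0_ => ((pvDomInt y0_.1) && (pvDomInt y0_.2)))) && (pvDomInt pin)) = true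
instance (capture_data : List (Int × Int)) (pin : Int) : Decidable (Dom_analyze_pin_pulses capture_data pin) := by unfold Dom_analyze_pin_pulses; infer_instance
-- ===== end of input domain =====

-- B replaces A's per-sample prev_state scan by a run-length decomposition (outer loop jumps
-- run to run, inner loop finds each run's end, one transition per run boundary); equal return
-- values proved for pin ≥ 0 (Python raises ValueError on '1 << pin' for negative pin).


-- ===== PORT A =====
-- loop body: state = bool(gpio_val & mask); append on change when prev_state is not None
def pvStepA (mask : Int) (acc : List (Int × String) × Option Bool) (p : Int × Int) :
    List (Int × String) × Option Bool :=
  let state : Bool := decide ((PySem.Int.band p.2 mask) ≠ 0)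
  match acc.2 with
  | some prev =>
      if state ≠ prev then
        (acc.1 ++ [(p.1, if state then "rise" else "fall")], some state)
      else (acc.1, some state)
  | none => (acc.1, some state)

def analyze_pin_pulses (capture_data : List (Int × Int)) (pin : Int) : List (Int × String) :=
  let mask : Int := 1 <<< pin.toNat   -- '1 << pin'; faithful for pin ≥ 0 (Pre_), Python raises otherwise
  (capture_data.foldl (pvStepA mask) ([], none)).1

-- ===== PORT B =====
-- pairs = [(t, bool(g & mask)) for t, g in capture_data]
def pvStates (mask : Int) (capture_data : List (Int × Int)) : List (Int × Bool) :=
  capture_data.map (fun p => (p.1, decide ((PySem.Int.band p.2 mask) ≠ 0)))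

-- inner while: 'while j < n and pairs[j][1] == s: j += 1' — returns the final j (the run's
-- end); the fuel argument (always ≥ n - j) only makes the loop total, it never cuts it short
def pvRunEnd (pairs : List (Int × Bool)) (s : Bool) : Nat → Nat → Nat
  | 0, j => j
  | fuel + 1, j =>
      if j < pairs.length ∧ (pairs.getD j (0, false)).2 = s then pvRunEnd pairs s fuel (j + 1)
      else j

-- outer while: 'while i < n: …; i = j' — fuel (always ≥ n - i) only makes the loop total
def pvOuterB (pairs : List (Int × Bool)) : Nat → Nat → List (Int × String) → List (Int × String)
  | 0, _, out => out
  | fuel + 1, i, out =>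
      if i < pairs.length then
        let s := (pairs.getD i (0, false)).2
        let j := pvRunEnd pairs s pairs.length (i + 1)
        let out' :=
          if j < pairs.length then
            out ++ [((pairs.getD j (0, false)).1, if (pairs.getD j (0, false)).2 then "rise" else "fall")]
          else out
        pvOuterB pairs fuel j out'
      else out

def analyze_pin_pulses_alt (capture_data : List (Int × Int)) (pin : Int) : List (Int × String) :=
  let mask : Int := 1 <<< pin.toNat
  let pairs := pvStates mask capture_data
  pvOuterB pairs pairs.length 0 []

-- ===== PRECONDITION & SPEC =====
-- excludes pin < 0, on which Python's '1 << pin' raises ValueError (negative shift count)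
def Pre_analyze_pin_pulses (capture_data : List (Int × Int)) (pin : Int) : Prop := 0 ≤ pin
instance (capture_data : List (Int × Int)) (pin : Int) : Decidable (Pre_analyze_pin_pulses capture_data pin) := by unfold Pre_analyze_pin_pulses; infer_instance
def pvWitness_analyze_pin_pulses : (List (Int × Int)) × Int := ([(0, 0), (5, 2), (9, 0)], 1)

def Spec_analyze_pin_pulses (capture_data : List (Int × Int)) (pin : Int) (out : List (Int × String)) : Prop := out = analyze_pin_pulses_alt capture_data pin
instance (capture_data : List (Int × Int)) (pin : Int) (out : List (Int × String)) : Decidable (Spec_analyze_pin_pulses capture_data pin out) := by unfold Spec_analyze_pin_pulses; infer_instance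

-- ===== CLAIM (what is proved, stated in full; the proofs are below) =====
def Claim_equal_analyze_pin_pulses : Prop := ∀ (capture_data : List (Int × Int)) (pin : Int), Dom_analyze_pin_pulses capture_data pin → Pre_analyze_pin_pulses capture_data pin → Spec_analyze_pin_pulses capture_data pin (analyze_pin_pulses capture_data pin)

-- ===== LEMMAS AND PROOFS =====

-- canonical transition function both ports are reduced to
def pvTrans (prev : Bool) : List (Int × Bool) → List (Int × String)
  | [] => []
  | (t, s) :: rest =>
      (if s ≠ prev then [(t, if s then "rise" else "fall")] else []) ++ pvTrans s rest

-- A's running scan, seeded with a known previous state, equals pvTrans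
theorem pvA_eq_trans (mask : Int) (l : List (Int × Int)) :
    ∀ (prev : Bool) (acc : List (Int × String)),
    (l.foldl (pvStepA mask) (acc, some prev)).1 = acc ++ pvTrans prev (pvStates mask l) := by
  induction l with
  | nil => intro prev acc; simp [pvStates, pvTrans]
  | cons q rest ih =>
      intro prev acc
      simp only [List.foldl_cons, pvStates, List.map_cons, pvTrans, pvStepA]
      generalize (decide ((PySem.Int.band q.2 mask) ≠ 0)) = s
      rcases eq_or_ne s prev with h | h
      · subst h; simpa [pvStates] using ih s acc
      · simpa [h, pvStates, List.append_assoc] using ih s (acc ++ [(q.1, if s then "rise" else "fall")])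

-- the inner while never moves j backwards
theorem pvRunEnd_ge (pairs : List (Int × Bool)) (s : Bool) :
    ∀ (fuel j : Nat), j ≤ pvRunEnd pairs s fuel j := by
  intro fuel
  induction fuel with
  | zero => intro j; exact le_refl j
  | succ f ih =>
      intro j
      simp only [pvRunEnd]
      split
      · exact le_trans (Nat.le_succ j) (ih (j + 1))
      · exact le_refl j

-- run skipping: with enough fuel, within a run of state s pvTrans emits nothing, and at the
-- run's end the state differs from s (if still in range)
theorem pvRunEnd_spec (pairs : List (Int × Bool)) (s : Bool) :
    ∀ (fuel j : Nat), pairs.length ≤ j + fuel →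
    pvTrans s (pairs.drop j) = pvTrans s (pairs.drop (pvRunEnd pairs s fuel j)) ∧
    (pvRunEnd pairs s fuel j < pairs.length → (pairs.getD (pvRunEnd pairs s fuel j) (0, false)).2 ≠ s) := by
  intro fuel
  induction fuel with
  | zero =>
      intro j hf
      have h0 : pvRunEnd pairs s 0 j = j := rfl
      rw [h0]
      exact ⟨rfl, fun hlt => absurd hlt (by omega)⟩
  | succ f ih =>
      intro j hf
      simp only [pvRunEnd]
      split
      · rename_i h
        obtain ⟨hj, hs⟩ := h
        have hdrop : pairs.drop j = pairs[j] :: pairs.drop (j + 1) := List.drop_eq_getElem_cons hj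
        have hget : (pairs.getD j (0, false)) = pairs[j] := List.getD_eq_getElem _ _ hj
        obtain ⟨ih1, ih2⟩ := ih (j + 1) (by omega)
        refine ⟨?_, ih2⟩
        rw [hget] at hs
        rcases hpj : pairs[j] with ⟨t, b⟩
        rw [hpj] at hs
        have hb : b = s := hs
        rw [hdrop, hpj]
        simp only [pvTrans]
        rw [hb]
        simp [ih1]
      · rename_i h
        exact ⟨rfl, fun hlt => by
          by_contra hc
          exact h ⟨hlt, hc⟩⟩

-- with enough fuel the outer loop, started at index i < n, appends exactly pvTrans of the tail
theorem pvOuterB_eq_trans (pairs : List (Int × Bool)) :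
    ∀ (fuel i : Nat) (out : List (Int × String)), pairs.length ≤ i + fuel → i < pairs.length →
    pvOuterB pairs fuel i out = out ++ pvTrans (pairs.getD i (0, false)).2 (pairs.drop (i + 1)) := by
  intro fuel
  induction fuel with
  | zero => intro i out hf hi; omega
  | succ f ih =>
      intro i out hf hi
      simp only [pvOuterB, hi, if_true]
      set s := (pairs.getD i (0, false)).2 with hs
      set j := pvRunEnd pairs s pairs.length (i + 1) with hj
      have hji : i + 1 ≤ j := hj ▸ pvRunEnd_ge pairs s pairs.length (i + 1)
      obtain ⟨hskip, hdiff⟩ := pvRunEnd_spec pairs s pairs.length (i + 1) (by omega)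
      rw [← hj] at hskip hdiff
      by_cases hjl : j < pairs.length
      · simp only [hjl, if_true]
        have hget : (pairs.getD j (0, false)) = pairs[j] := List.getD_eq_getElem _ _ hjl
        rcases hpj : pairs[j] with ⟨t, b⟩
        have hb : b ≠ s := by rw [hget, hpj] at hdiff; exact hdiff hjl
        have ihr := ih j (out ++ [((pairs.getD j (0, false)).1, if (pairs.getD j (0, false)).2 then "rise" else "fall")]) (by omega) hjl
        rw [hget, hpj] at ihr ⊢
        rw [ihr, hskip, List.drop_eq_getElem_cons hjl, hpj]
        simp [pvTrans, hb, List.append_assoc]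
      · simp only [hjl, if_false]
        rw [hskip, List.drop_eq_nil_of_le (le_of_not_gt hjl)]
        have : pvOuterB pairs f j out = out := by
          cases f with
          | zero => rfl
          | succ f' => simp only [pvOuterB, hjl, if_false]
        rw [this]
        simp [pvTrans]

-- ===== VERDICT (by name: the statement is the Claim_ definition above) =====
theorem analyze_pin_pulses_spec : Claim_equal_analyze_pin_pulses := by
  intro capture_data pin _ _
  unfold Spec_analyze_pin_pulses analyze_pin_pulses analyze_pin_pulses_alt
  cases capture_data with
  | nil => rfl
  | cons p rest =>
      simp only [List.foldl_cons, pvStepA]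
      rw [pvA_eq_trans]
      have hlen : 0 < (pvStates (1 <<< pin.toNat) (p :: rest)).length := by
        simp [pvStates]
      rw [pvOuterB_eq_trans _ _ 0 [] (by omega) hlen]
      simp [pvStates]
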